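-- pv_equiv track=rewrite | github.com/songkg7/1day-1algorithm | programmers/level2/방금그곡.py | convert
-- ===== SOURCE A (Python) =====
-- def convert(string):
--     pitch = {
--         "C#": "c",
--         "D#": "d",
--         "F#": "f",
--         "G#": "g",
--         "A#": "a",
--     }
--     for i in pitch.keys():
--         find = string.find(i)
--         if find >= 0:
--             string = string.replace(i, pitch[i])
--     return string
-- ===== SOURCE B (Python) =====
-- def convert(string):
--     low = {'C': 'c', 'D': 'd', 'F': 'f', 'G': 'g', 'A': 'a'}
--     out = []
--     i = 0
--     n = len(string)
--     while i < n:
--         c = string[i]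
--         if c in low and i + 1 < n and string[i + 1] == '#':
--             out.append(low[c])
--             i += 2
--         else:
--             out.append(c)
--             i += 1
--     return ''.join(out)
-- ===== Notes on version B (the rewrite author's own statement) =====
-- stated objective: alternative
-- what changed: Replaces the five sequential full-string find/replace passes with a single left-to-right lookahead scan that maps each sharp-note pair to its lowercase letter in one pass; same O(n) work, but in CPython the C-level replace of A beats B's per-character loop.
import Mathlib
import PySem

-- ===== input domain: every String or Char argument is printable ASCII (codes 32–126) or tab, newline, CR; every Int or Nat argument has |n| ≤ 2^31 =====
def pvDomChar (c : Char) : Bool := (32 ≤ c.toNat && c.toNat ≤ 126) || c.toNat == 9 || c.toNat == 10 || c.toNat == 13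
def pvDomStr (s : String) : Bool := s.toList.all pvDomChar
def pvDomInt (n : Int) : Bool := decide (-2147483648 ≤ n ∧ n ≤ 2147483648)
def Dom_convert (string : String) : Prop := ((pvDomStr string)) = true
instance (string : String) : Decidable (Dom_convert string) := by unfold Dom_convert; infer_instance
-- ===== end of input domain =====

-- B (alternative): one left-to-right lookahead scan instead of A's five sequential find/replace passes.

-- ===== PORT A =====
-- literal port of A: a dict of sharp notes, then for each key: find, and replace if found
def convert (string : String) : String :=
  let pitch : PySem.Dict String String :=
    PySem.Dict.ofList [("C#", "c"), ("D#", "d"), ("F#", "f"), ("G#", "g"), ("A#", "a")]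
  (PySem.Dict.keys pitch).foldl
    (fun s i =>
      let find := PySem.Str.find s i
      if find ≥ 0 then
        PySem.Str.replace s i ((PySem.Dict.get? pitch i).getD s)  -- key always present; getD arm unreachable
      else s)
    string

-- ===== PORT B =====
-- B's lowercase table low, as an Option-valued lookup
def lowNote? (c : Char) : Option Char :=
  if c = 'C' then some 'c'
  else if c = 'D' then some 'd'
  else if c = 'F' then some 'f'
  else if c = 'G' then some 'g'
  else if c = 'A' then some 'a'
  else none

-- B's index loop with lookahead, as recursion over the character list
def scanNotes : List Char → List Char
  | [] => []
  | [c] => [c]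
  | c :: d :: t =>
    match lowNote? c with
    | some x => if d = '#' then x :: scanNotes t else c :: scanNotes (d :: t)
    | none => c :: scanNotes (d :: t)
termination_by l => l.length

def convert_alt (string : String) : String :=
  String.ofList (scanNotes string.toList)

-- ===== PRECONDITION & SPEC =====
def Spec_convert (string : String) (out : String) : Prop := out = convert_alt string
instance (string : String) (out : String) : Decidable (Spec_convert string out) := by unfold Spec_convert; infer_instance

-- ===== CLAIM (what is proved, stated in full; the proofs are below) =====
def Claim_equal_convert : Prop := ∀ (string : String), Dom_convert string → Spec_convert string (convert string)

-- ===== LEMMAS AND PROOFS =====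

-- one Python replace pass for a two-character pattern [X, '#'] → [x], as clean recursion
def rep (X x : Char) : List Char → List Char
  | [] => []
  | [c] => [c]
  | c :: d :: t =>
    if c = X ∧ d = '#' then x :: rep X x t else c :: rep X x (d :: t)
termination_by l => l.length

theorem rep_cons (X x c : Char) (l : List Char)
    (h : ¬(c = X ∧ l.head? = some '#')) : rep X x (c :: l) = c :: rep X x l := by
  cases l with
  | nil => simp [rep]
  | cons d t =>
    have : ¬(c = X ∧ d = '#') := by simpa using h
    simp [rep, this]

theorem rep_push (X x c : Char) (l : List Char) (h : c ≠ X) :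
    rep X x (c :: l) = c :: rep X x l := by
  apply rep_cons
  rintro ⟨rfl, -⟩; exact h rfl

theorem head?_rep (X x : Char) (hx : x ≠ '#') (l : List Char)
    (h : l.head? ≠ some '#') : (rep X x l).head? ≠ some '#' := by
  cases l with
  | nil => simp [rep]
  | cons c t =>
    cases t with
    | nil => simpa [rep] using h
    | cons d u =>
      by_cases hc : c = X ∧ d = '#'
      · simp [rep, hc, hx]
      · simpa [rep, hc] using h

theorem replace_go_eq (X x : Char) :
    ∀ fuel (l acc : List Char), l.length ≤ fuel →
      PySem.Chars.replace.go [X, '#'] [x] fuel l acc = acc.reverse ++ rep X x l := by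
  intro fuel
  induction fuel with
  | zero =>
    intro l acc hl
    have : l = [] := List.eq_nil_of_length_eq_zero (Nat.le_zero.mp hl)
    subst this
    simp [PySem.Chars.replace.go, rep]
  | succ n ih =>
    intro l acc hl
    cases l with
    | nil => simp [PySem.Chars.replace.go, rep]
    | cons c t =>
      by_cases hp : [X, '#'].isPrefixOf (c :: t) = true
      · obtain ⟨c', t', rfl⟩ : ∃ c' t', t = c' :: t' := by
          cases t with
          | nil => simp [List.isPrefixOf] at hp
          | cons a b => exact ⟨a, b, rfl⟩
        have hX : X = c ∧ '#' = c' := by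
          simpa [List.isPrefixOf] using hp
        obtain ⟨rfl, rfl⟩ := hX
        rw [PySem.Chars.replace.go]
        simp only [hp, if_true]
        have hlen : t'.length ≤ n := by simp at hl; omega
        rw [show List.drop [X, '#'].length (X :: '#' :: t') = t' from rfl, ih _ _ hlen]
        simp [rep]
      · rw [PySem.Chars.replace.go]
        simp only [hp]
        have hlen : t.length ≤ n := by simp at hl; omega
        rw [ih _ _ hlen]
        have : rep X x (c :: t) = c :: rep X x t := by
          apply rep_cons
          rintro ⟨h1, h2⟩
          cases t with
          | nil => simp at h2
          | cons d u =>
            simp at h2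
            exact hp (by simp [List.isPrefixOf, h1, h2])
        simp [this]

theorem replace_eq_rep (X x : Char) (l : List Char) :
    PySem.Chars.replace l [X, '#'] [x] = rep X x l := by
  rw [PySem.Chars.replace]
  simp only [List.isEmpty_cons, Bool.false_eq_true, if_false]
  exact replace_go_eq X x l.length l [] le_rfl

theorem rep_of_not_infix (X x : Char) (l : List Char)
    (h : ¬ [X, '#'] <:+: l) : rep X x l = l := by
  induction l with
  | nil => simp [rep]
  | cons c t ih =>
    have ht : ¬ [X, '#'] <:+: t := fun hi => h (hi.trans (List.suffix_cons c t).isInfix)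
    rw [rep_cons]
    · rw [ih ht]
    · rintro ⟨rfl, h2⟩
      cases t with
      | nil => simp at h2
      | cons d u =>
        simp at h2
        subst h2
        exact h ⟨[], u, by simp⟩

-- A's loop body equals an unconditional replace: replace is the identity when the pattern is absent
theorem step_eq (s : String) (X x : Char) :
    (if PySem.Str.find s (String.ofList [X, '#']) ≥ 0 then
       PySem.Str.replace s (String.ofList [X, '#']) (String.ofList [x]) else s)
    = PySem.Str.replace s (String.ofList [X, '#']) (String.ofList [x]) := by
  split_ifs with h
  · rfl
  · have hni : ¬ (String.ofList [X, '#']).toList <:+: s.toList := by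
      rw [← PySem.Str.find_nonneg_iff]
      simpa using h
    apply String.ext
    rw [PySem.Str.toList_replace]
    simp only [String.toList_ofList] at hni ⊢
    rw [replace_eq_rep, rep_of_not_infix _ _ _ hni]

-- the heart of the equivalence: the five passes compose into the single lookahead scan
theorem chain_eq_scan : ∀ n (s : List Char), s.length ≤ n →
    rep 'A' 'a' (rep 'G' 'g' (rep 'F' 'f' (rep 'D' 'd' (rep 'C' 'c' s)))) = scanNotes s := by
  intro n
  induction n with
  | zero =>
    intro s hs
    have : s = [] := List.eq_nil_of_length_eq_zero (Nat.le_zero.mp hs)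
    subst this; simp [rep, scanNotes]
  | succ n ih =>
    intro s hs
    rcases s with _ | ⟨c, _ | ⟨d, t⟩⟩
    · simp [rep, scanNotes]
    · simp [rep, scanNotes]
    · have hs' : t.length + 2 ≤ n + 1 := by simpa using hs
      have hlt : t.length ≤ n := by omega
      have hdt : (d :: t).length ≤ n := by simp; omega
      by_cases hkey : (lowNote? c).isSome ∧ d = '#'
      · obtain ⟨hc, rfl⟩ := hkey
        have ihc := ih t hlt
        by_cases h1 : c = 'C'
        · subst h1
          rw [show rep 'C' 'c' ('C' :: '#' :: t) = 'c' :: rep 'C' 'c' t from by simp [rep],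
              rep_push 'D' 'd' 'c' _ (by decide), rep_push 'F' 'f' 'c' _ (by decide),
              rep_push 'G' 'g' 'c' _ (by decide), rep_push 'A' 'a' 'c' _ (by decide), ihc]
          simp [scanNotes, lowNote?]
        by_cases h2 : c = 'D'
        · subst h2
          rw [rep_push 'C' 'c' 'D' _ (by decide), rep_push 'C' 'c' '#' _ (by decide),
              show rep 'D' 'd' ('D' :: '#' :: rep 'C' 'c' t) = 'd' :: rep 'D' 'd' (rep 'C' 'c' t)
                from by simp [rep],
              rep_push 'F' 'f' 'd' _ (by decide), rep_push 'G' 'g' 'd' _ (by decide),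
              rep_push 'A' 'a' 'd' _ (by decide), ihc]
          simp [scanNotes, lowNote?]
        by_cases h3 : c = 'F'
        · subst h3
          rw [rep_push 'C' 'c' 'F' _ (by decide), rep_push 'C' 'c' '#' _ (by decide),
              rep_push 'D' 'd' 'F' _ (by decide), rep_push 'D' 'd' '#' _ (by decide),
              show rep 'F' 'f' ('F' :: '#' :: rep 'D' 'd' (rep 'C' 'c' t))
                  = 'f' :: rep 'F' 'f' (rep 'D' 'd' (rep 'C' 'c' t)) from by simp [rep],
              rep_push 'G' 'g' 'f' _ (by decide), rep_push 'A' 'a' 'f' _ (by decide), ihc]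
          simp [scanNotes, lowNote?]
        by_cases h4 : c = 'G'
        · subst h4
          rw [rep_push 'C' 'c' 'G' _ (by decide), rep_push 'C' 'c' '#' _ (by decide),
              rep_push 'D' 'd' 'G' _ (by decide), rep_push 'D' 'd' '#' _ (by decide),
              rep_push 'F' 'f' 'G' _ (by decide), rep_push 'F' 'f' '#' _ (by decide),
              show rep 'G' 'g' ('G' :: '#' :: rep 'F' 'f' (rep 'D' 'd' (rep 'C' 'c' t)))
                  = 'g' :: rep 'G' 'g' (rep 'F' 'f' (rep 'D' 'd' (rep 'C' 'c' t))) from by simp [rep],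
              rep_push 'A' 'a' 'g' _ (by decide), ihc]
          simp [scanNotes, lowNote?]
        have h5 : c = 'A' := by
          by_contra h5
          simp [lowNote?, h1, h2, h3, h4, h5] at hc
        subst h5
        rw [rep_push 'C' 'c' 'A' _ (by decide), rep_push 'C' 'c' '#' _ (by decide),
            rep_push 'D' 'd' 'A' _ (by decide), rep_push 'D' 'd' '#' _ (by decide),
            rep_push 'F' 'f' 'A' _ (by decide), rep_push 'F' 'f' '#' _ (by decide),
            rep_push 'G' 'g' 'A' _ (by decide), rep_push 'G' 'g' '#' _ (by decide),
            show rep 'A' 'a' ('A' :: '#' :: rep 'G' 'g' (rep 'F' 'f' (rep 'D' 'd' (rep 'C' 'c' t))))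
                = 'a' :: rep 'A' 'a' (rep 'G' 'g' (rep 'F' 'f' (rep 'D' 'd' (rep 'C' 'c' t))))
              from by simp [rep], ihc]
        simp [scanNotes, lowNote?]
      · -- no replacement fires on c: every pass pushes c through
        have ihdt := ih (d :: t) hdt
        by_cases hk : (lowNote? c).isSome
        · -- c is a note letter but d ≠ '#'
          have hd : d ≠ '#' := fun h => hkey ⟨hk, h⟩
          have h0 : (d :: t).head? ≠ some '#' := by simpa using hd
          have hh1 := head?_rep 'C' 'c' (by decide) _ h0
          have hh2 := head?_rep 'D' 'd' (by decide) _ hh1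
          have hh3 := head?_rep 'F' 'f' (by decide) _ hh2
          have hh4 := head?_rep 'G' 'g' (by decide) _ hh3
          rw [rep_cons 'C' 'c' c _ (fun h => h0 h.2),
              rep_cons 'D' 'd' c _ (fun h => hh1 h.2),
              rep_cons 'F' 'f' c _ (fun h => hh2 h.2),
              rep_cons 'G' 'g' c _ (fun h => hh3 h.2),
              rep_cons 'A' 'a' c _ (fun h => hh4 h.2), ihdt]
          obtain ⟨x, hx⟩ := Option.isSome_iff_exists.mp hk
          simp [scanNotes, hx, hd]
        · -- c is not a note letter at all
          have hnone : lowNote? c = none := Option.not_isSome_iff_eq_none.mp hk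
          have hC : c ≠ 'C' := by rintro rfl; simp [lowNote?] at hnone
          have hD : c ≠ 'D' := by rintro rfl; simp [lowNote?] at hnone
          have hF : c ≠ 'F' := by rintro rfl; simp [lowNote?] at hnone
          have hG : c ≠ 'G' := by rintro rfl; simp [lowNote?] at hnone
          have hA : c ≠ 'A' := by rintro rfl; simp [lowNote?] at hnone
          rw [rep_push 'C' 'c' c _ hC, rep_push 'D' 'd' c _ hD, rep_push 'F' 'f' c _ hF,
              rep_push 'G' 'g' c _ hG, rep_push 'A' 'a' c _ hA, ihdt]
          simp [scanNotes, hnone]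

-- ===== VERDICT (by name: the statement is the Claim_ definition above) =====
theorem convert_spec : Claim_equal_convert := by
  intro string _
  unfold Spec_convert convert convert_alt
  show (List.foldl (fun s i =>
      if PySem.Str.find s i ≥ 0 then
        PySem.Str.replace s i ((PySem.Dict.get? (PySem.Dict.ofList
          [("C#", "c"), ("D#", "d"), ("F#", "f"), ("G#", "g"), ("A#", "a")]) i).getD s)
      else s) string ["C#", "D#", "F#", "G#", "A#"]) = _
  simp only [List.foldl]
  have hCs : ("C#" : String) = String.ofList ['C', '#'] := rfl
  have hDs : ("D#" : String) = String.ofList ['D', '#'] := rfl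
  have hFs : ("F#" : String) = String.ofList ['F', '#'] := rfl
  have hGs : ("G#" : String) = String.ofList ['G', '#'] := rfl
  have hAs : ("A#" : String) = String.ofList ['A', '#'] := rfl
  have hgC : ∀ s : String, (PySem.Dict.get? (PySem.Dict.ofList
      [("C#", "c"), ("D#", "d"), ("F#", "f"), ("G#", "g"), ("A#", "a")]
      : PySem.Dict String String) "C#").getD s = String.ofList ['c'] := fun s => by
    rw [show (PySem.Dict.get? (PySem.Dict.ofList
      [("C#", "c"), ("D#", "d"), ("F#", "f"), ("G#", "g"), ("A#", "a")]
      : PySem.Dict String String) "C#") = some (String.ofList ['c']) from by decide]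
    rfl
  have hgD : ∀ s : String, (PySem.Dict.get? (PySem.Dict.ofList
      [("C#", "c"), ("D#", "d"), ("F#", "f"), ("G#", "g"), ("A#", "a")]
      : PySem.Dict String String) "D#").getD s = String.ofList ['d'] := fun s => by
    rw [show (PySem.Dict.get? (PySem.Dict.ofList
      [("C#", "c"), ("D#", "d"), ("F#", "f"), ("G#", "g"), ("A#", "a")]
      : PySem.Dict String String) "D#") = some (String.ofList ['d']) from by decide]
    rfl
  have hgF : ∀ s : String, (PySem.Dict.get? (PySem.Dict.ofList
      [("C#", "c"), ("D#", "d"), ("F#", "f"), ("G#", "g"), ("A#", "a")]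
      : PySem.Dict String String) "F#").getD s = String.ofList ['f'] := fun s => by
    rw [show (PySem.Dict.get? (PySem.Dict.ofList
      [("C#", "c"), ("D#", "d"), ("F#", "f"), ("G#", "g"), ("A#", "a")]
      : PySem.Dict String String) "F#") = some (String.ofList ['f']) from by decide]
    rfl
  have hgG : ∀ s : String, (PySem.Dict.get? (PySem.Dict.ofList
      [("C#", "c"), ("D#", "d"), ("F#", "f"), ("G#", "g"), ("A#", "a")]
      : PySem.Dict String String) "G#").getD s = String.ofList ['g'] := fun s => by
    rw [show (PySem.Dict.get? (PySem.Dict.ofList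
      [("C#", "c"), ("D#", "d"), ("F#", "f"), ("G#", "g"), ("A#", "a")]
      : PySem.Dict String String) "G#") = some (String.ofList ['g']) from by decide]
    rfl
  have hgA : ∀ s : String, (PySem.Dict.get? (PySem.Dict.ofList
      [("C#", "c"), ("D#", "d"), ("F#", "f"), ("G#", "g"), ("A#", "a")]
      : PySem.Dict String String) "A#").getD s = String.ofList ['a'] := fun s => by
    rw [show (PySem.Dict.get? (PySem.Dict.ofList
      [("C#", "c"), ("D#", "d"), ("F#", "f"), ("G#", "g"), ("A#", "a")]
      : PySem.Dict String String) "A#") = some (String.ofList ['a']) from by decide]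
    rfl
  simp only [hCs, hDs, hFs, hGs, hAs, hgC, hgD, hgF, hgG, hgA, step_eq]
  apply String.ext
  simp only [PySem.Str.toList_replace, String.toList_ofList]
  rw [replace_eq_rep, replace_eq_rep, replace_eq_rep, replace_eq_rep, replace_eq_rep]
  exact chain_eq_scan string.toList.length string.toList le_rfl
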